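-- pv_equiv track=rewrite | github.com/iswdp/termplot | termplot/term_plot.py | make_col
-- ===== SOURCE A (Python) =====
-- def make_col(y,max_height, plot_char):
--     #requires positive value
--     col_list = []
--     for i in range(max_height):
--         if i >= y:
--             col_list.append(' ')
--         else:
--             col_list.append(plot_char)
--     return col_list
-- ===== SOURCE B (Python) =====
-- def make_col(y, max_height, plot_char):
--     n = max(0, min(y, max_height))
--     return [plot_char] * n + [' '] * (max_height - n)
-- ===== Notes on version B (the rewrite author's own statement) =====
-- stated objective: simpler
-- what changed: Replaced A's per-index loop with a branch inside it by a closed-form clamped count n = max(0, min(y, max_height)) and two list-multiplications [plot_char]*n + [' ']*(max_height-n).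
import Mathlib
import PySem

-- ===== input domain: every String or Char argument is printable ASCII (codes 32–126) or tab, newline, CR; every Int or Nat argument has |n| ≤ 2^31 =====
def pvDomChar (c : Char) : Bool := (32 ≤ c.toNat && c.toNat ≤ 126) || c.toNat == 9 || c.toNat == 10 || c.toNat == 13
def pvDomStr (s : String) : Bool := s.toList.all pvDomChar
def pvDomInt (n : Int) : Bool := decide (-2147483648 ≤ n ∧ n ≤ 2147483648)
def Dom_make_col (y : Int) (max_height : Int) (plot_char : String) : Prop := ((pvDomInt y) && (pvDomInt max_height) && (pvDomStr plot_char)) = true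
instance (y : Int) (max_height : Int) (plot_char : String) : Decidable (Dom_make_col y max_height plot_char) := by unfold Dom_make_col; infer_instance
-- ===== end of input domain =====

-- B replaces A's per-index loop (branch on i >= y at each index) by a closed-form
-- clamped count and two homogeneous replicated runs; objective: simpler.

-- ===== PORT A =====
-- for i in range(max_height): append ' ' if i >= y else plot_char
def make_col (y : Int) (max_height : Int) (plot_char : String) : List String :=
  (PySem.List.pyRange 0 max_height 1).foldl
    (fun col_list i => if i ≥ y then col_list ++ [" "] else col_list ++ [plot_char]) []

-- ===== PORT B =====
-- n = max(0, min(y, max_height)); [plot_char]*n + [' ']*(max_height-n)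
def make_col_alt (y : Int) (max_height : Int) (plot_char : String) : List String :=
  let n : Int := max 0 (min y max_height)
  List.replicate n.toNat plot_char ++ List.replicate (max_height - n).toNat " "

-- ===== PRECONDITION & SPEC =====
def Spec_make_col (y : Int) (max_height : Int) (plot_char : String) (out : List String) : Prop := out = make_col_alt y max_height plot_char
instance (y : Int) (max_height : Int) (plot_char : String) (out : List String) : Decidable (Spec_make_col y max_height plot_char out) := by unfold Spec_make_col; infer_instance

-- ===== CLAIM (what is proved, stated in full; the proofs are below) =====
def Claim_equal_make_col : Prop := ∀ (y : Int) (max_height : Int) (plot_char : String), Dom_make_col y max_height plot_char → Spec_make_col y max_height plot_char (make_col y max_height plot_char)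

-- ===== LEMMAS AND PROOFS =====

theorem make_col_key (n : Nat) (y : Int) (pc : String) :
    (PySem.List.pyRange 0 n 1).foldl
      (fun col_list i => if i ≥ y then col_list ++ [" "] else col_list ++ [pc]) []
    = List.replicate (max 0 (min y n)).toNat pc
      ++ List.replicate ((n : Int) - max 0 (min y n)).toNat " " := by
  induction n with
  | zero => simp [PySem.List.pyRange_one_eq_nil]
  | succ k ih =>
    have hsplit : PySem.List.pyRange 0 ((k : Int) + 1) 1
        = PySem.List.pyRange 0 k 1 ++ [(k : Int)] :=
      PySem.List.pyRange_one_succ_right (by exact_mod_cast Nat.zero_le k)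
    push_cast
    rw [hsplit, List.foldl_append, ih]
    by_cases hy : (k : Int) ≥ y
    · have h1 : min y ((k : Int) + 1) = y := by omega
      have h2 : min y (k : Int) = y := by omega
      have h3 : ((k : Int) + 1 - max 0 y).toNat = ((k : Int) - max 0 y).toNat + 1 := by omega
      simp [hy, h1, h3, List.replicate_succ']
    · have h1 : min y ((k : Int) + 1) = (k : Int) + 1 := by omega
      have h2 : min y (k : Int) = (k : Int) := by omega
      have h3 : max 0 ((k : Int) + 1) = (k : Int) + 1 := by omega
      have h4 : max 0 (k : Int) = (k : Int) := by omega
      have h5 : ((k : Int) + 1).toNat = (k : Int).toNat + 1 := by omega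
      simp [hy, h1, h2, h3, h5, List.replicate_succ']

-- ===== VERDICT (by name: the statement is the Claim_ definition above) =====
theorem make_col_spec : Claim_equal_make_col := by
  intro y m pc _
  show make_col y m pc = make_col_alt y m pc
  by_cases hm : 0 ≤ m
  · have hcast : ((m.toNat : Int)) = m := Int.toNat_of_nonneg hm
    unfold make_col make_col_alt
    rw [← hcast]
    exact make_col_key m.toNat y pc
  · unfold make_col make_col_alt
    rw [PySem.List.pyRange_one_eq_nil (by omega)]
    have h1 : max 0 (min y m) = 0 := by omega
    have h2 : (m - max 0 (min y m)).toNat = 0 := by omega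
    simp [h1]
    omega
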